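-- pv_equiv track=rewrite | github.com/rayymus/python-to-pseudocode | tests/main_old.py | no_comment
-- ===== SOURCE A (Python) =====
-- def no_comment(word: str) -> tuple[str, str] | str:
--     string_scope = False
--     for i, l in enumerate(word):
--         if l in {"'", '"'} and not string_scope:
--             string_scope = l
--         elif l == string_scope:
--             string_scope = False
--         elif not string_scope and l == "#":
--             return word[:i], word[i:] #  word, comment
--     return word, ""
-- ===== SOURCE B (Python) =====
-- def no_comment(word: str):
--     # Skip over whole quoted runs with str.find instead of a char-by-char state machine.
--     i = 0
--     n = len(word)
--     while i < n:
--         c = word[i]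
--         if c == '#':
--             return word[:i], word[i:]
--         if c in "'\"":
--             j = word.find(c, i + 1)
--             if j == -1:
--                 return word, ""
--             i = j + 1
--         else:
--             i += 1
--     return word, ""
-- ===== Notes on version B (the rewrite author's own statement) =====
-- stated objective: idiomatic
-- what changed: Replaces the char-by-char loop carrying a quote-state variable with an index loop that jumps over whole quoted runs using str.find and returns immediately on an unterminated quote.
import Mathlib
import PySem

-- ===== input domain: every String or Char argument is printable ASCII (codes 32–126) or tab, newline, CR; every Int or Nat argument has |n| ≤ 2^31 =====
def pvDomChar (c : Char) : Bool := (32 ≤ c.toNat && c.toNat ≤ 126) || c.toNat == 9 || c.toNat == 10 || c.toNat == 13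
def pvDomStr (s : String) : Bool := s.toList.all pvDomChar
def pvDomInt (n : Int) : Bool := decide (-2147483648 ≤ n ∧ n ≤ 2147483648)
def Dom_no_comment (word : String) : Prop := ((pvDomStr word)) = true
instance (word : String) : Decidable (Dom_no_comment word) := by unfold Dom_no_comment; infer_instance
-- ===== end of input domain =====

-- B replaces A's char-by-char quote-state machine by jumping over whole quoted runs with str.find (idiomatic; return value only).

-- ===== PORT A =====
-- A's for-loop over enumerate(word) with early return; string_scope : Option Char (False ↦ none, a quote char ↦ some).
-- word[:i] / word[i:] for the enumerate index 0 ≤ i ≤ len(word) are exactly take i / drop i.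
def noCommentLoopA (w : String) : List Char → Nat → Option Char → String × String
  | [], _, _ => (w, "")
  | l :: rest, i, scope =>
    if (l = '\'' ∨ l = '"') ∧ scope = none then noCommentLoopA w rest (i+1) (some l)
    else if some l = scope then noCommentLoopA w rest (i+1) none
    else if scope = none ∧ l = '#' then (String.ofList (w.toList.take i), String.ofList (w.toList.drop i))
    else noCommentLoopA w rest (i+1) scope

def no_comment (word : String) : String × String :=
  noCommentLoopA word word.toList 0 none

-- ===== PORT B =====
-- B's while loop over the index i, kept as recursion on the remaining suffix together with the absolute index;
-- word.find(c, i+1) is idxOf? of c in the suffix after position i (j = -1 ↦ none, j = i+1+k ↦ some k).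
def noCommentLoopB (w : String) : List Char → Nat → String × String
  | [], _ => (w, "")
  | c :: rest, i =>
    if c = '#' then (String.ofList (w.toList.take i), String.ofList (w.toList.drop i))
    else if c = '\'' ∨ c = '"' then
      match List.idxOf? c rest with
      | none => (w, "")
      | some k => noCommentLoopB w (rest.drop (k+1)) (i + k + 2)
    else noCommentLoopB w rest (i+1)
termination_by cs _ => cs.length
decreasing_by
  all_goals simp

def no_comment_alt (word : String) : String × String :=
  noCommentLoopB word word.toList 0

-- ===== PRECONDITION & SPEC =====
def Spec_no_comment (word : String) (out : String × String) : Prop := out = no_comment_alt word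
instance (word : String) (out : String × String) : Decidable (Spec_no_comment word out) := by unfold Spec_no_comment; infer_instance

-- ===== CLAIM (what is proved, stated in full; the proofs are below) =====
def Claim_equal_no_comment : Prop := ∀ (word : String), Dom_no_comment word → Spec_no_comment word (no_comment word)

-- ===== LEMMAS AND PROOFS =====

-- Inside a string opened with quote q, A just scans for the matching q (all other branches are dead),
-- i.e. it performs exactly B's find-jump.
theorem noCommentLoopA_some (w : String) (q : Char) :
    ∀ (cs : List Char) (i : Nat),
      noCommentLoopA w cs i (some q) =
        match List.idxOf? q cs with
        | none => (w, "")
        | some k => noCommentLoopA w (cs.drop (k+1)) (i + k + 1) none := by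
  intro cs
  induction cs with
  | nil => intro i; simp [noCommentLoopA, List.idxOf?]
  | cons l t ih =>
    intro i
    by_cases hlq : l = q
    · subst hlq
      rw [noCommentLoopA, if_neg (by simp), if_pos rfl]
      simp [List.idxOf?_cons]
    · have hne : (l == q) = false := by simp [hlq]
      rw [noCommentLoopA]
      rw [if_neg (by simp), if_neg (by simp [hlq]), if_neg (by simp)]
      rw [ih (i+1)]
      rw [List.idxOf?_cons, hne]
      cases h : List.idxOf? q t with
      | none => simp
      | some k =>
        simp only [Option.map_some, List.drop_succ_cons]
        have he : i + 1 + k + 1 = i + (k + 1) + 1 := by omega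
        rw [he]
        simp

theorem loops_eq (w : String) :
    ∀ (n : Nat) (cs : List Char) (i : Nat), cs.length ≤ n →
      noCommentLoopA w cs i none = noCommentLoopB w cs i := by
  intro n
  induction n with
  | zero =>
    intro cs i h
    have : cs = [] := List.eq_nil_of_length_eq_zero (Nat.le_zero.mp h)
    subst this
    simp [noCommentLoopA, noCommentLoopB]
  | succ m ih =>
    intro cs i h
    cases cs with
    | nil => simp [noCommentLoopA, noCommentLoopB]
    | cons c t =>
      by_cases hq : c = '\'' ∨ c = '"'
      · have hch : c ≠ '#' := by rcases hq with h' | h' <;> subst h' <;> decide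
        rw [noCommentLoopA]
        rw [if_pos ⟨hq, rfl⟩]
        rw [noCommentLoopA_some]
        rw [noCommentLoopB, if_neg hch, if_pos hq]
        cases hfind : List.idxOf? c t with
        | none => simp
        | some k =>
          simp only []
          have hlen : (t.drop (k+1)).length ≤ m := by
            have := List.length_drop (l := t) (i := k+1)
            simp at h
            omega
          have he : i + 1 + k + 1 = i + k + 2 := by omega
          rw [he]
          exact ih (t.drop (k+1)) (i + k + 2) hlen
      · by_cases hch : c = '#'
        · subst hch
          rw [noCommentLoopA, noCommentLoopB]
          simp
        · rw [noCommentLoopA, noCommentLoopB]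
          rw [if_neg (by tauto), if_neg (by simp), if_neg (by tauto), if_neg hch, if_neg hq]
          exact ih t (i+1) (by simp at h; omega)

-- ===== VERDICT (by name: the statement is the Claim_ definition above) =====
theorem no_comment_spec : Claim_equal_no_comment := by
  intro word _
  unfold Spec_no_comment no_comment no_comment_alt
  exact loops_eq word word.toList.length word.toList 0 le_rfl
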